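-- pv_equiv track=rewrite | github.com/pypi-data/pypi-mirror-244 | packages/ChromoPhyloGen/ChromoPhyloGen-1.0.tar.gz/ChromoPhyloGen-1.0/ChromoPhyloGen/distance.py | zerodisthelper
-- ===== SOURCE A (Python) =====
-- import copy
--
-- def distcalc(node1, node2):
--     assert len(node1) == len(node2)
--     if len(node1) == 1:
--         return abs(node1[0] - node2[0])
--     else:
--         d = 0
--         newlist = copy.deepcopy(node1)
--         for i in range(0, len(node2)):
--             newlist[i] -= node2[i]
--         while newlist:
--             if newlist[0] == 0:
--                 newlist.pop(0)
--             elif newlist[0] > 0: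
--                 k = 0
--                 for i in range(0, len(newlist)):
--                     if newlist[i] > 0:
--                         k = i
--                     else:
--                         break
--                 for i in range(0, k + 1):
--                     newlist[i] -= 1
--                 d += 1
--             elif newlist[0] < 0:
--                 k = 0
--                 for i in range(0, len(newlist)):
--                     if newlist[i] < 0:
--                         k = i
--                     else:
--                         break
--                 for i in range(0, k + 1):
--                     newlist[i] += 1
--                 d += 1
--         return abs(d)
--
-- def zerodisthelper(node1, node2):
--     n1 = copy.deepcopy(node1)
--     n2 = copy.deepcopy(node2)
--     dist = 0
--     temp1 = []
--     temp2 = []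
--     while n1:
--         x1 = n1.pop()
--         x2 = n2.pop()
--         if x1 == 0:
--             if x2 == 0:
--                 temp1.append(x1)
--                 temp2.append(x2)
--             else:
--                 temp1.append(x1)
--                 temp2.append(0)
--                 # return 1000000*1000
--         else:
--             temp1.append(x1)
--             temp2.append(x2)
--     return distcalc(temp1, temp2)
-- ===== SOURCE B (Python) =====
-- def zerodisthelper(node1, node2):
--     # Closed form: tail-aligned pairs (matching A's pop-from-the-end pairing);
--     # a zero in node1 forces a zero difference; cost is the fence-painting
--     # formula over the difference sequence in one pass.
--     d = 0
--     prev = 0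
--     for a, b in zip(reversed(node1), reversed(node2)):
--         x = 0 if a == 0 else a - b
--         if x > 0:
--             d += max(0, x - prev) if prev > 0 else x
--         elif x < 0:
--             d += max(0, prev - x) if prev < 0 else -x
--         prev = x
--     return d
-- ===== Notes on version B (the rewrite author's own statement) =====
-- stated objective: faster
-- what changed: Replaces A's simulation that repeatedly adds/subtracts 1 on the leading same-sign run of the difference list until it is all zero by a single left-to-right pass summing the closed-form fence-painting cost of each difference w.r.t. its predecessor.
import Mathlib
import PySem

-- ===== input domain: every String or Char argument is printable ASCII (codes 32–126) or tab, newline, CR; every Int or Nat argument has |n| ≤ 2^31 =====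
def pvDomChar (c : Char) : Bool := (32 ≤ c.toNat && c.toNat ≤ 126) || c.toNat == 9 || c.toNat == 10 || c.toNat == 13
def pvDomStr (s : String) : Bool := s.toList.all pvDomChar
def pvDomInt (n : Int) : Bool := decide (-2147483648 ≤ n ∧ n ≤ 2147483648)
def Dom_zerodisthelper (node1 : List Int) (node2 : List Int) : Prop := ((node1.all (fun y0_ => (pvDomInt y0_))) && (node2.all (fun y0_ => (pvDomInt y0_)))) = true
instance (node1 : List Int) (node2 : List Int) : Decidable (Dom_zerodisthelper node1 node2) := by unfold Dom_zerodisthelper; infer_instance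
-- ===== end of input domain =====

-- B replaces A's O(n·V) unit-step simulation by a one-pass O(n) closed-form
-- (fence-painting) sum over the difference sequence; objective: faster.

-- ===== PORT A =====

-- helpers needed only for the termination of A's while-loop port (cited in decreasing_by)
def decPos : List Int → List Int
  | [] => []
  | y :: ys => if 0 < y then (y - 1) :: decPos ys else y :: ys

def incNeg : List Int → List Int
  | [] => []
  | y :: ys => if y < 0 then (y + 1) :: incNeg ys else y :: ys

def posLen : List Int → Nat
  | [] => 0
  | y :: ys => if 0 < y then posLen ys + 1 else 0

def negLen : List Int → Nat
  | [] => 0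
  | y :: ys => if y < 0 then negLen ys + 1 else 0

def muL (l : List Int) : Nat := (l.map Int.natAbs).sum + l.length

-- Python: k = 0; for i in range(len(newlist)): if newlist[i] > 0: k = i else: break
def kposAux : List Int → Nat → Nat → Nat
  | [], _, k => k
  | y :: ys, i, k => if 0 < y then kposAux ys (i + 1) i else k

def knegAux : List Int → Nat → Nat → Nat
  | [], _, k => k
  | y :: ys, i, k => if y < 0 then knegAux ys (i + 1) i else k

-- Python: for i in range(0, k+1): newlist[i] -= 1
def decIdx : List Int → Nat → List Int
  | [], _ => []
  | y :: ys, k => (y - 1) :: (if k = 0 then ys else decIdx ys (k - 1))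

def incIdx : List Int → Nat → List Int
  | [], _ => []
  | y :: ys, k => (y + 1) :: (if k = 0 then ys else incIdx ys (k - 1))

theorem kposAux_eq : ∀ (ys : List Int) (i : Nat), kposAux ys (i + 1) i = i + posLen ys := by
  intro ys
  induction ys with
  | nil => intro i; simp [kposAux, posLen]
  | cons y ys ih =>
    intro i
    by_cases h : 0 < y
    · simp [kposAux, posLen, h, ih (i + 1)]; omega
    · simp [kposAux, posLen, h]

theorem knegAux_eq : ∀ (ys : List Int) (i : Nat), knegAux ys (i + 1) i = i + negLen ys := by
  intro ys
  induction ys with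
  | nil => intro i; simp [knegAux, negLen]
  | cons y ys ih =>
    intro i
    by_cases h : y < 0
    · simp [knegAux, negLen, h, ih (i + 1)]; omega
    · simp [knegAux, negLen, h]

theorem decIdx_posLen : ∀ (xs : List Int) (x : Int), decIdx (x :: xs) (posLen xs) = (x - 1) :: decPos xs := by
  intro xs
  induction xs with
  | nil => intro x; simp [decIdx, posLen, decPos]
  | cons y ys ih =>
    intro x
    by_cases h : 0 < y
    · simp [decIdx, posLen, h, decPos]
      have := ih y
      simpa [decIdx] using this
    · simp [decIdx, posLen, h, decPos]

theorem incIdx_negLen : ∀ (xs : List Int) (x : Int), incIdx (x :: xs) (negLen xs) = (x + 1) :: incNeg xs := by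
  intro xs
  induction xs with
  | nil => intro x; simp [incIdx, negLen, incNeg]
  | cons y ys ih =>
    intro x
    by_cases h : y < 0
    · simp [incIdx, negLen, h, incNeg]
      have := ih y
      simpa [incIdx] using this
    · simp [incIdx, negLen, h, incNeg]

theorem sum_decPos_le : ∀ (xs : List Int), ((decPos xs).map Int.natAbs).sum ≤ (xs.map Int.natAbs).sum := by
  intro xs
  induction xs with
  | nil => simp [decPos]
  | cons y ys ih =>
    by_cases h : 0 < y
    · simp [decPos, h]
      have : (y - 1).natAbs ≤ y.natAbs := by omega
      omega
    · simp [decPos, h]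

theorem sum_incNeg_le : ∀ (xs : List Int), ((incNeg xs).map Int.natAbs).sum ≤ (xs.map Int.natAbs).sum := by
  intro xs
  induction xs with
  | nil => simp [incNeg]
  | cons y ys ih =>
    by_cases h : y < 0
    · simp [incNeg, h]
      have : (y + 1).natAbs ≤ y.natAbs := by omega
      omega
    · simp [incNeg, h]

theorem length_decPos (xs : List Int) : (decPos xs).length = xs.length := by
  induction xs with
  | nil => simp [decPos]
  | cons y ys ih => by_cases h : 0 < y <;> simp [decPos, h, ih]

theorem length_incNeg (xs : List Int) : (incNeg xs).length = xs.length := by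
  induction xs with
  | nil => simp [incNeg]
  | cons y ys ih => by_cases h : y < 0 <;> simp [incNeg, h, ih]

theorem mu_decPos_lt (xs : List Int) (x : Int) (hx : 0 < x) :
    muL ((x - 1) :: decPos xs) < muL (x :: xs) := by
  have h1 := sum_decPos_le xs
  have h2 := length_decPos xs
  have h3 : (x - 1).natAbs < x.natAbs := by omega
  simp only [muL, List.map, List.sum_cons, List.length_cons, h2]
  omega

theorem mu_incNeg_lt (xs : List Int) (x : Int) (hx : x < 0) :
    muL ((x + 1) :: incNeg xs) < muL (x :: xs) := by
  have h1 := sum_incNeg_le xs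
  have h2 := length_incNeg xs
  have h3 : (x + 1).natAbs < x.natAbs := by omega
  simp only [muL, List.map, List.sum_cons, List.length_cons, h2]
  omega

-- the 'while newlist:' loop of distcalc, transliterated (d is the accumulator 'd += 1')
def loopA : List Int → Int → Int
  | [], d => d
  | x :: xs, d =>
    if x = 0 then loopA xs d
    else if 0 < x then
      loopA (decIdx (x :: xs) (kposAux (x :: xs) 0 0)) (d + 1)
    else
      loopA (incIdx (x :: xs) (knegAux (x :: xs) 0 0)) (d + 1)
termination_by l => muL l
decreasing_by
  · simp [muL]; omega
  · have hk : kposAux (x :: xs) 0 0 = posLen xs := by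
      simp only [kposAux, if_pos (by omega : (0:Int) < x)]
      simpa using kposAux_eq xs 0
    rw [hk, decIdx_posLen]
    exact mu_decPos_lt xs x (by omega)
  · have hx : x < 0 := by omega
    have hk : knegAux (x :: xs) 0 0 = negLen xs := by
      simp only [knegAux, if_pos hx]
      simpa using knegAux_eq xs 0
    rw [hk, incIdx_negLen]
    exact mu_incNeg_lt xs x hx

-- distcalc: lengths are asserted equal in Python and are always equal at the
-- (single) call site; 'newlist[i] -= node2[i]' over the full range is zipWith sub.
def distcalcP (n1 n2 : List Int) : Int :=
  if n1.length = 1 then |n1.headD 0 - n2.headD 0|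
  else |loopA (List.zipWith (fun a b => a - b) n1 n2) 0|

-- the 'while n1:' pop loop of zerodisthelper (pop = remove last element)
def popLoop (n1 n2 t1 t2 : List Int) : List Int × List Int :=
  if n1 = [] then (t1, t2)
  else
    let x1 := n1.getLastD 0
    let x2 := n2.getLastD 0   -- Python raises IndexError when n2 is empty here; excluded by Pre_
    if x1 = 0 then
      if x2 = 0 then popLoop n1.dropLast n2.dropLast (t1 ++ [x1]) (t2 ++ [x2])
      else popLoop n1.dropLast n2.dropLast (t1 ++ [x1]) (t2 ++ [0])
    else popLoop n1.dropLast n2.dropLast (t1 ++ [x1]) (t2 ++ [x2])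
termination_by n1.length
decreasing_by
  all_goals
    have : n1.length ≠ 0 := fun h => ‹n1 ≠ []› (List.length_eq_zero_iff.mp h)
    simp [List.length_dropLast]; omega

def zerodisthelper (node1 : List Int) (node2 : List Int) : Int :=
  let p := popLoop node1 node2 [] []
  distcalcP p.1 p.2

-- ===== PORT B =====

def costB (prev x : Int) : Int :=
  if 0 < x then (if 0 < prev then max 0 (x - prev) else x)
  else if x < 0 then (if prev < 0 then max 0 (prev - x) else -x)
  else 0

def zerodisthelper_alt (node1 : List Int) (node2 : List Int) : Int :=
  let diff := (node1.reverse.zip node2.reverse).map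
    (fun ab => if ab.1 = 0 then (0 : Int) else ab.1 - ab.2)
  (diff.foldl (fun s x => (s.1 + costB s.2 x, x)) ((0 : Int), (0 : Int))).1

-- ===== PRECONDITION & SPEC =====
-- Pre_ excludes node2 shorter than node1, on which A raises IndexError (n2.pop() on empty list).
def Pre_zerodisthelper (node1 : List Int) (node2 : List Int) : Prop :=
  node1.length ≤ node2.length
instance (node1 : List Int) (node2 : List Int) : Decidable (Pre_zerodisthelper node1 node2) := by
  unfold Pre_zerodisthelper; infer_instance

def pvWitness_zerodisthelper : List Int × List Int := ([1, 0, -2], [0, 3, 1])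

def Spec_zerodisthelper (node1 : List Int) (node2 : List Int) (out : Int) : Prop := out = zerodisthelper_alt node1 node2
instance (node1 : List Int) (node2 : List Int) (out : Int) : Decidable (Spec_zerodisthelper node1 node2 out) := by unfold Spec_zerodisthelper; infer_instance

-- ===== CLAIM (what is proved, stated in full; the proofs are below) =====
def Claim_equal_zerodisthelper : Prop := ∀ (node1 : List Int) (node2 : List Int), Dom_zerodisthelper node1 node2 → Pre_zerodisthelper node1 node2 → Spec_zerodisthelper node1 node2 (zerodisthelper node1 node2)

-- ===== LEMMAS AND PROOFS =====

-- the closed-form cost of a difference list, read left to right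
def F : Int → List Int → Int
  | _, [] => 0
  | p, x :: xs => costB p x + F x xs

theorem costB_nonneg (p x : Int) : 0 ≤ costB p x := by
  unfold costB; split_ifs <;> omega

theorem F_nonneg : ∀ (l : List Int) (p : Int), 0 ≤ F p l := by
  intro l
  induction l with
  | nil => intro p; simp [F]
  | cons x xs ih =>
    intro p
    have := costB_nonneg p x
    have := ih x
    simp [F]; omega

theorem costB_zero_abs (x : Int) : costB 0 x = |x| := by
  rw [abs_eq_max_neg]; unfold costB; split_ifs <;> omega

theorem F_dec_shift : ∀ (xs : List Int) (x : Int), 0 < x → F (x - 1) (decPos xs) = F x xs := by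
  intro xs
  induction xs with
  | nil => intro x _; simp [decPos, F]
  | cons y ys ih =>
    intro x hx
    by_cases h : 0 < y
    · have hcost : costB (x - 1) (y - 1) = costB x y := by
        unfold costB; split_ifs <;> omega
      simp only [decPos, if_pos h, F, hcost, ih y h]
    · have hcost : costB (x - 1) y = costB x y := by
        unfold costB; split_ifs <;> omega
      simp only [decPos, if_neg h, F, hcost]

theorem F_inc_shift : ∀ (xs : List Int) (x : Int), x < 0 → F (x + 1) (incNeg xs) = F x xs := by
  intro xs
  induction xs with
  | nil => intro x _; simp [incNeg, F]
  | cons y ys ih =>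
    intro x hx
    by_cases h : y < 0
    · have hcost : costB (x + 1) (y + 1) = costB x y := by
        unfold costB; split_ifs <;> omega
      simp only [incNeg, if_pos h, F, hcost, ih y h]
    · have hcost : costB (x + 1) y = costB x y := by
        unfold costB; split_ifs <;> omega
      simp only [incNeg, if_neg h, F, hcost]

theorem F_decPos (xs : List Int) (x : Int) (hx : 0 < x) :
    1 + F 0 ((x - 1) :: decPos xs) = F 0 (x :: xs) := by
  have h1 := F_dec_shift xs x hx
  have hc1 : costB 0 (x - 1) = x - 1 := by unfold costB; split_ifs <;> omega
  have hc2 : costB 0 x = x := by unfold costB; split_ifs <;> omega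
  simp only [F, hc1, hc2, h1]; omega

theorem F_incNeg (xs : List Int) (x : Int) (hx : x < 0) :
    1 + F 0 ((x + 1) :: incNeg xs) = F 0 (x :: xs) := by
  have h1 := F_inc_shift xs x hx
  have hc1 : costB 0 (x + 1) = -(x + 1) := by unfold costB; split_ifs <;> omega
  have hc2 : costB 0 x = -x := by unfold costB; split_ifs <;> omega
  simp only [F, hc1, hc2, h1]; omega

theorem loopA_eq_F_aux : ∀ (n : Nat) (l : List Int) (d : Int), muL l ≤ n → loopA l d = d + F 0 l := by
  intro n
  induction n with
  | zero =>
    intro l d h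
    match l with
    | [] => simp [loopA, F]
    | x :: xs => simp [muL] at h
  | succ n ih =>
    intro l d h
    match l with
    | [] => simp [loopA, F]
    | x :: xs =>
      by_cases h0 : x = 0
      · subst h0
        have hmu : muL xs ≤ n := by simp [muL] at h ⊢; omega
        have hF : costB 0 0 = 0 := by unfold costB; simp
        have hstep : loopA ((0:Int) :: xs) d = loopA xs d := by rw [loopA]; simp
        rw [hstep, ih xs d hmu]
        simp only [F, hF]
        omega
      · by_cases hp : 0 < x
        · have hk : kposAux (x :: xs) 0 0 = posLen xs := by
            simp only [kposAux, if_pos hp]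
            simpa using kposAux_eq xs 0
          have hlt := mu_decPos_lt xs x hp
          have hmu : muL ((x - 1) :: decPos xs) ≤ n := by omega
          rw [loopA, if_neg h0, if_pos hp, hk, decIdx_posLen, ih _ _ hmu,
            ← F_decPos xs x hp]
          omega
        · have hx : x < 0 := by omega
          have hk : knegAux (x :: xs) 0 0 = negLen xs := by
            simp only [knegAux, if_pos hx]
            simpa using knegAux_eq xs 0
          have hlt := mu_incNeg_lt xs x hx
          have hmu : muL ((x + 1) :: incNeg xs) ≤ n := by omega
          rw [loopA, if_neg h0, if_neg hp, hk, incIdx_negLen, ih _ _ hmu,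
            ← F_incNeg xs x hx]
          omega

theorem loopA_eq_F (l : List Int) : loopA l 0 = F 0 l := by
  rw [loopA_eq_F_aux (muL l) l 0 (le_refl _)]; omega

theorem foldl_F : ∀ (l : List Int) (d p : Int),
    (l.foldl (fun s x => (s.1 + costB s.2 x, x)) (d, p)).1 = d + F p l := by
  intro l
  induction l with
  | nil => intro d p; simp [F]
  | cons x xs ih =>
    intro d p
    simp only [List.foldl, F, ih]
    omega

-- popLoop characterisation (needs node2 at least as long as node1)
theorem popLoop_spec : ∀ (n : Nat) (n1 n2 t1 t2 : List Int), n1.length = n → n1.length ≤ n2.length →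
    popLoop n1 n2 t1 t2 =
      (t1 ++ n1.reverse,
       t2 ++ (n1.reverse.zip n2.reverse).map (fun ab => if ab.1 = 0 then (0 : Int) else ab.2)) := by
  intro n
  induction n with
  | zero =>
    intro n1 n2 t1 t2 hn _
    have h1 : n1 = [] := List.length_eq_zero_iff.mp hn
    subst h1
    rw [popLoop]
    simp
  | succ n ih =>
    intro n1 n2 t1 t2 hn hle
    rcases n1.eq_nil_or_concat with h1 | ⟨as, a, rfl⟩
    · subst h1; simp at hn
    rcases n2.eq_nil_or_concat with h2 | ⟨bs, b, rfl⟩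
    · subst h2; simp at hle
    simp only [List.concat_eq_append] at hn hle ⊢
    have hne : as ++ [a] ≠ [] := by simp
    have hlen : as.length = n := by simp at hn; omega
    have hlen2 : as.length ≤ bs.length := by simp at hle; omega
    have hstep : popLoop (as ++ [a]) (bs ++ [b]) t1 t2 =
        popLoop as bs (t1 ++ [a]) (t2 ++ [if a = 0 then 0 else b]) := by
      rw [popLoop]
      simp only [if_neg hne, List.getLastD_concat, List.dropLast_concat]
      by_cases ha : a = 0
      · by_cases hb : b = 0
        · simp [ha, hb]
        · simp [ha, hb]
      · simp [ha]
    rw [hstep, ih as bs _ _ hlen hlen2]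
    simp only [List.reverse_append, List.reverse_cons, List.reverse_nil, List.nil_append,
      List.cons_append, List.zip_cons_cons, List.map_cons, List.append_assoc]

theorem zip_sub_map : ∀ (u v : List Int),
    List.zipWith (fun a b => a - b) u ((u.zip v).map (fun ab => if ab.1 = 0 then (0 : Int) else ab.2)) =
      (u.zip v).map (fun ab => if ab.1 = 0 then (0 : Int) else ab.1 - ab.2) := by
  intro u
  induction u with
  | nil => intro v; simp
  | cons a u ih =>
    intro v
    match v with
    | [] => simp
    | b :: v =>
      simp only [List.zip_cons_cons, List.map_cons, List.zipWith_cons_cons, ih]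
      by_cases ha : a = 0 <;> simp [ha]

-- ===== VERDICT (by name: the statement is the Claim_ definition above) =====
theorem zerodisthelper_spec : Claim_equal_zerodisthelper := by
  intro node1 node2 _ hpre
  unfold Spec_zerodisthelper zerodisthelper zerodisthelper_alt
  have hpop := popLoop_spec node1.length node1 node2 [] [] rfl hpre
  simp only [List.nil_append] at hpop
  rw [hpop]
  set D := (node1.reverse.zip node2.reverse).map
      (fun ab => if ab.1 = 0 then (0 : Int) else ab.1 - ab.2) with hD
  have hfold : ((D.foldl (fun s x => (s.1 + costB s.2 x, x)) ((0:Int), (0:Int))).1) = F 0 D := by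
    rw [foldl_F]; omega
  unfold distcalcP
  simp only [List.length_reverse]
  by_cases h1 : node1.length = 1
  · rw [if_pos h1]
    rcases List.length_eq_one_iff.mp h1 with ⟨a, rfl⟩
    obtain ⟨c, cs, hr⟩ : ∃ c cs, node2.reverse = c :: cs := by
      cases hrev : node2.reverse with
      | nil =>
        have hnil : node2 = [] := by simpa using congrArg List.reverse hrev
        rw [hnil] at hpre; simp [Pre_zerodisthelper] at hpre
      | cons c cs => exact ⟨c, cs, rfl⟩
    rw [hr] at hD
    simp only [List.reverse_cons, List.reverse_nil, List.nil_append, List.zip_cons_cons,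
      List.zip_nil_left, List.map_cons, List.map_nil] at hD
    rw [hfold, hD, hr]
    simp only [List.reverse_cons, List.reverse_nil, List.nil_append, List.zip_cons_cons,
      List.zip_nil_left, List.map_cons, List.map_nil, List.headD_cons, F, costB_zero_abs]
    by_cases ha : a = 0 <;> simp [ha]
  · rw [if_neg h1, zip_sub_map, ← hD, loopA_eq_F, hfold]
    exact abs_of_nonneg (F_nonneg D 0)
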